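-- pv_equiv track=rewrite | github.com/hirakCoder/Swiftgen | backend/modification_handler.py | _generate_issue_key
-- ===== SOURCE A (Python) =====
-- def _generate_issue_key(description: str) -> str:
--     """Generate a key for tracking similar issues"""
--     # Extract key terms
--     keywords = []
--     desc_lower = description.lower()
--
--     # SSL-related keywords
--     if any(term in desc_lower for term in ['ssl', 'https', 'certificate', 'transport', 'ats']):
--         keywords.append('ssl')
--
--     # iOS permission keywords
--     if any(term in desc_lower for term in ['permission', 'camera', 'photo', 'location']):
--         keywords.append('permission')
--
--     # Error types
--     if 'crash' in desc_lower:
--         keywords.append('crash')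
--     if 'build' in desc_lower:
--         keywords.append('build')
--
--     return '_'.join(keywords) if keywords else 'general_issue'
-- ===== SOURCE B (Python) =====
-- # Bitmask version: OR one bit per matching term in a flat term->bit map,
-- # then look the final key up in a precomputed table of all 16 combinations.
-- _TERM_BITS = [
--     ('ssl', 1), ('https', 1), ('certificate', 1), ('transport', 1), ('ats', 1),
--     ('permission', 2), ('camera', 2), ('photo', 2), ('location', 2),
--     ('crash', 4),
--     ('build', 8),
-- ]
--
-- _KEY_BY_MASK = [
--     'general_issue',                    # 0
--     'ssl',                              # 1
--     'permission',                       # 2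
--     'ssl_permission',                   # 3
--     'crash',                            # 4
--     'ssl_crash',                        # 5
--     'permission_crash',                 # 6
--     'ssl_permission_crash',             # 7
--     'build',                            # 8
--     'ssl_build',                        # 9
--     'permission_build',                 # 10
--     'ssl_permission_build',             # 11
--     'crash_build',                      # 12
--     'ssl_crash_build',                  # 13
--     'permission_crash_build',           # 14
--     'ssl_permission_crash_build',       # 15
-- ]
--
-- def _generate_issue_key(description: str) -> str:
--     """Generate a key for tracking similar issues (bitmask + lookup table version)"""
--     desc_lower = description.lower()
--     mask = 0
--     for term, bit in _TERM_BITS: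
--         if term in desc_lower:
--             mask |= bit
--     return _KEY_BY_MASK[mask]
-- ===== Notes on version B (the rewrite author's own statement) =====
-- stated objective: alternative
-- what changed: Replaces the four if/append branches plus join with a single pass over a flat term-to-bit map that ORs bits into a mask, then returns the answer by indexing a precomputed table of all 16 key strings; no keyword list is ever built or joined.
import Mathlib
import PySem

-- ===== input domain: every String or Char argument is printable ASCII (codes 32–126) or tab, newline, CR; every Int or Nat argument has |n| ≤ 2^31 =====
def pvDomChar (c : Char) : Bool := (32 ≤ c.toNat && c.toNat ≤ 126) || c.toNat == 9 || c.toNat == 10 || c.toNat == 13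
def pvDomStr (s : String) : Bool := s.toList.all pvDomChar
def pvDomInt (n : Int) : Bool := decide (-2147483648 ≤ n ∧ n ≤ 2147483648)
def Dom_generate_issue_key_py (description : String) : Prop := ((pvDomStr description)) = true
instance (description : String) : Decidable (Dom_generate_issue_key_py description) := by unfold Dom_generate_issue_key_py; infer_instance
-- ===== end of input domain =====

-- B replaces A's four if/append branches and join by one OR-fold over a flat term->bit map
-- plus a 16-entry lookup table of all key combinations (alternative structure, same cost).


-- ===== PORT A =====
def generate_issue_key_py (description : String) : String :=
  let keywords : List String := []
  let desc_lower := PySem.Str.lower description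
  let keywords :=
    if (["ssl", "https", "certificate", "transport", "ats"]).any
        (fun term => PySem.Str.isIn term desc_lower) then keywords ++ ["ssl"] else keywords
  let keywords :=
    if (["permission", "camera", "photo", "location"]).any
        (fun term => PySem.Str.isIn term desc_lower) then keywords ++ ["permission"] else keywords
  let keywords :=
    if PySem.Str.isIn "crash" desc_lower then keywords ++ ["crash"] else keywords
  let keywords :=
    if PySem.Str.isIn "build" desc_lower then keywords ++ ["build"] else keywords
  if keywords ≠ [] then PySem.Str.join "_" keywords else "general_issue"

-- ===== PORT B =====
def pvTermBits : List (String × Nat) :=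
  [("ssl", 1), ("https", 1), ("certificate", 1), ("transport", 1), ("ats", 1),
   ("permission", 2), ("camera", 2), ("photo", 2), ("location", 2),
   ("crash", 4),
   ("build", 8)]

def pvKeyByMask : List String :=
  ["general_issue", "ssl", "permission", "ssl_permission",
   "crash", "ssl_crash", "permission_crash", "ssl_permission_crash",
   "build", "ssl_build", "permission_build", "ssl_permission_build",
   "crash_build", "ssl_crash_build", "permission_crash_build", "ssl_permission_crash_build"]

def generate_issue_key_py_alt (description : String) : String :=
  let desc_lower := PySem.Str.lower description
  let mask :=
    pvTermBits.foldl (fun m p => if PySem.Str.isIn p.1 desc_lower then m ||| p.2 else m) 0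
  pvKeyByMask.getD mask ""

-- ===== PRECONDITION & SPEC =====
def Spec_generate_issue_key_py (description : String) (out : String) : Prop := out = generate_issue_key_py_alt description
instance (description : String) (out : String) : Decidable (Spec_generate_issue_key_py description out) := by unfold Spec_generate_issue_key_py; infer_instance

-- ===== CLAIM (what is proved, stated in full; the proofs are below) =====
def Claim_equal_generate_issue_key_py : Prop := ∀ (description : String), Dom_generate_issue_key_py description → Spec_generate_issue_key_py description (generate_issue_key_py description)

-- ===== LEMMAS AND PROOFS =====
-- A's computation abstracted over the 11 term-membership booleans
def pvA (c1 c2 c3 c4 c5 c6 c7 c8 c9 c10 c11 : Bool) : String :=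
  let k : List String := []
  let k := if c1 || (c2 || (c3 || (c4 || c5))) then k ++ ["ssl"] else k
  let k := if c6 || (c7 || (c8 || c9)) then k ++ ["permission"] else k
  let k := if c10 then k ++ ["crash"] else k
  let k := if c11 then k ++ ["build"] else k
  if k ≠ [] then PySem.Str.join "_" k else "general_issue"

-- B's computation abstracted over the same booleans
def pvB (c1 c2 c3 c4 c5 c6 c7 c8 c9 c10 c11 : Bool) : String :=
  let m : Nat := 0
  let m := if c1 then m ||| 1 else m
  let m := if c2 then m ||| 1 else m
  let m := if c3 then m ||| 1 else m
  let m := if c4 then m ||| 1 else m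
  let m := if c5 then m ||| 1 else m
  let m := if c6 then m ||| 2 else m
  let m := if c7 then m ||| 2 else m
  let m := if c8 then m ||| 2 else m
  let m := if c9 then m ||| 2 else m
  let m := if c10 then m ||| 4 else m
  let m := if c11 then m ||| 8 else m
  pvKeyByMask.getD m ""

set_option maxHeartbeats 1000000 in
theorem pvAB : ∀ c1 c2 c3 c4 c5 c6 c7 c8 c9 c10 c11 : Bool,
    pvA c1 c2 c3 c4 c5 c6 c7 c8 c9 c10 c11 = pvB c1 c2 c3 c4 c5 c6 c7 c8 c9 c10 c11 := by
  decide

theorem pvA_eq (description : String) :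
    generate_issue_key_py description =
      (let f := fun t => PySem.Str.isIn t (PySem.Str.lower description)
       pvA (f "ssl") (f "https") (f "certificate") (f "transport") (f "ats")
           (f "permission") (f "camera") (f "photo") (f "location")
           (f "crash") (f "build")) := by
  simp only [generate_issue_key_py, pvA, List.any_cons, List.any_nil, Bool.or_false]

theorem pvB_eq (description : String) :
    generate_issue_key_py_alt description =
      (let f := fun t => PySem.Str.isIn t (PySem.Str.lower description)
       pvB (f "ssl") (f "https") (f "certificate") (f "transport") (f "ats")
           (f "permission") (f "camera") (f "photo") (f "location")
           (f "crash") (f "build")) := by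
  simp only [generate_issue_key_py_alt, pvB, pvTermBits, List.foldl_cons, List.foldl_nil]

theorem pv_main (description : String) :
    generate_issue_key_py description = generate_issue_key_py_alt description := by
  rw [pvA_eq, pvB_eq]
  exact pvAB _ _ _ _ _ _ _ _ _ _ _

-- ===== VERDICT (by name: the statement is the Claim_ definition above) =====
theorem generate_issue_key_py_spec : Claim_equal_generate_issue_key_py := by
  intro d _
  unfold Spec_generate_issue_key_py
  exact pv_main d
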